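-- pv_equiv track=rewrite | github.com/nchietala/WsgidavHomeProvider | WsgidavHomeProvider/provider.py | mod_to_stat
-- ===== SOURCE A (Python) =====
-- import stat
--
-- def mod_to_stat(mod: int) -> int:
--     """Convert unix chmod digit-based bitwise permissions to python stat bitwise permissions"""
--     mod = str(mod)
--     assert 3 <= len(mod) <= 4, "input value must be a 3 or 4 digit integer"
--     if len(mod) == 3:
--         ur, uw, ux, gr, gw, gx, sr, sw, sx = tuple(
--             int(i) & j for i in mod
--             for j in [4, 2, 1]
--         )
--         uid = 0
--         gid = 0
--         sticky = 0
--     else: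
--         uid, gid, sticky, ur, uw, ux, gr, gw, gx, sr, sw, sx = tuple(
--             int(i) & j for i in mod
--             for j in [4, 2, 1]
--         )
--
--     uid = uid and stat.S_ISUID
--     gid = gid and stat.S_ISGID
--     sticky = sticky and stat.S_ISVTX
--     ur = ur and stat.S_IRUSR
--     uw = uw and stat.S_IWUSR
--     ux = ux and stat.S_IXUSR
--     gr = gr and stat.S_IRGRP
--     gw = gw and stat.S_IWGRP
--     gx = gx and stat.S_IXGRP
--     sr = sr and stat.S_IROTH
--     sw = sw and stat.S_IWOTH
--     sx = sx and stat.S_IXOTH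
--
--     return uid ^ gid ^ sticky ^ ur ^ uw ^ ux ^ gr ^ gw ^ gx ^ sr ^ sw ^ sx
-- ===== SOURCE B (Python) =====
-- def mod_to_stat(mod: int) -> int:
--     """Convert unix chmod digit-based bitwise permissions to python stat bitwise permissions"""
--     mod = str(mod)
--     assert 3 <= len(mod) <= 4, "input value must be a 3 or 4 digit integer"
--     result = 0
--     for ch in mod:
--         result = result * 8 + (int(ch) & 7)
--     return result
-- ===== Notes on version B (the rewrite author's own statement) =====
-- stated objective: simpler
-- what changed: Replaced the 12-variable per-bit and/XOR mapping through stat constants by a single fold that accumulates the octal value digit by digit (result = result*8 + (int(ch) & 7)), exploiting that stat permission constants are exactly the octal bit positions.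
import Mathlib
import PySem

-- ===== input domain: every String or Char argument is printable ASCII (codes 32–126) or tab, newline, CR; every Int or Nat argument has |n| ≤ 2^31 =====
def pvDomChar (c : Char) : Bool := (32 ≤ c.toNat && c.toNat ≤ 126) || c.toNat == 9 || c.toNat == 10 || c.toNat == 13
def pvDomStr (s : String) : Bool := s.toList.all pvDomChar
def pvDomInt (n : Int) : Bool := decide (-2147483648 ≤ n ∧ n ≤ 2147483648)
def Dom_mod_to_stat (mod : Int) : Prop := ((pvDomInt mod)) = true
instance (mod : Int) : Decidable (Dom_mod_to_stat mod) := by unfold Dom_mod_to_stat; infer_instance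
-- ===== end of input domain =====

-- B replaces A's 12-variable per-bit and/XOR mapping through stat constants by a single
-- digit fold accumulating the octal value (alternative decomposition; same cost).

-- ===== PORT A =====
-- Python `a and b` on ints (a here is always ≥ 0): first operand if falsy, else second
def pyAnd (a b : Int) : Int := if a = 0 then a else b

-- int(i) for a one-character string i (exact: PySem.Int.ofStr?; the .getD 0 default is
-- unreachable under Pre_, where every character of str(mod) is a digit)
def digitInt (c : Char) : Int := (PySem.Int.ofStr? (String.ofList [c])).getD 0

def mod_to_stat (mod : Int) : Int :=
  let s := PySem.Int.toChars mod  -- mod = str(mod)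
  -- tuple(int(i) & j for i in mod for j in [4, 2, 1])
  let bits := s.flatMap (fun i => [(4 : Int), 2, 1].map (fun j => PySem.Int.band (digitInt i) j))
  let t : Int × Int × Int × Int × Int × Int × Int × Int × Int × Int × Int × Int :=
    if s.length = 3 then
      match bits with
      | [ur, uw, ux, gr, gw, gx, sr, sw, sx] => (0, 0, 0, ur, uw, ux, gr, gw, gx, sr, sw, sx)
      | _ => (0, 0, 0, 0, 0, 0, 0, 0, 0, 0, 0, 0)  -- unreachable: bits has length 9 here
    else
      match bits with
      | [uid, gid, sticky, ur, uw, ux, gr, gw, gx, sr, sw, sx] =>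
          (uid, gid, sticky, ur, uw, ux, gr, gw, gx, sr, sw, sx)
      | _ => (0, 0, 0, 0, 0, 0, 0, 0, 0, 0, 0, 0)  -- unreachable under Pre_: length is 12
  let (uid, gid, sticky, ur, uw, ux, gr, gw, gx, sr, sw, sx) := t
  -- uid = uid and stat.S_ISUID; … ; return uid ^ gid ^ … ^ sx  (constants inlined)
  PySem.Int.bxor (PySem.Int.bxor (PySem.Int.bxor (PySem.Int.bxor (PySem.Int.bxor (PySem.Int.bxor (PySem.Int.bxor (PySem.Int.bxor (PySem.Int.bxor (PySem.Int.bxor (PySem.Int.bxor (pyAnd uid 2048) (pyAnd gid 1024)) (pyAnd sticky 512)) (pyAnd ur 256)) (pyAnd uw 128)) (pyAnd ux 64)) (pyAnd gr 32)) (pyAnd gw 16)) (pyAnd gx 8)) (pyAnd sr 4)) (pyAnd sw 2)) (pyAnd sx 1)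

-- ===== PORT B =====
def mod_to_stat_alt (mod : Int) : Int :=
  (PySem.Int.toChars mod).foldl
    (fun r c => r * 8 + PySem.Int.band ((PySem.Int.ofStr? (String.ofList [c])).getD 0) 7) 0

-- ===== PRECONDITION & SPEC =====
-- Pre_ excludes exactly the inputs where A raises: str(mod) must have length 3 or 4 and
-- every character a digit (AssertionError on other lengths; ValueError on the '-' of a
-- negative number), i.e. 100 ≤ mod ≤ 9999.
def Pre_mod_to_stat (mod : Int) : Prop := 100 ≤ mod ∧ mod ≤ 9999
instance (mod : Int) : Decidable (Pre_mod_to_stat mod) := by unfold Pre_mod_to_stat; infer_instance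
def pvWitness_mod_to_stat : Int := (755)

def Spec_mod_to_stat (mod : Int) (out : Int) : Prop := out = mod_to_stat_alt mod
instance (mod : Int) (out : Int) : Decidable (Spec_mod_to_stat mod out) := by unfold Spec_mod_to_stat; infer_instance

-- ===== CLAIM (what is proved, stated in full; the proofs are below) =====
def Claim_equal_mod_to_stat : Prop := ∀ (mod : Int), Dom_mod_to_stat mod → Pre_mod_to_stat mod → Spec_mod_to_stat mod (mod_to_stat mod)

-- ===== LEMMAS AND PROOFS =====

theorem tdc_step (fuel n : Nat) (ds : List Char) :
    Nat.toDigitsCore 10 (fuel+1) n ds =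
      if n / 10 = 0 then Nat.digitChar (n % 10) :: ds
      else Nat.toDigitsCore 10 fuel (n / 10) (Nat.digitChar (n % 10) :: ds) := by
  rw [Nat.toDigitsCore]

theorem toChars_three (n : Nat) (h1 : 100 ≤ n) (h2 : n ≤ 999) :
    PySem.Int.toChars (n : Int) =
      [Nat.digitChar (n / 100), Nat.digitChar (n / 10 % 10), Nat.digitChar (n % 10)] := by
  obtain ⟨m, rfl⟩ : ∃ m, n = m + 3 := ⟨n - 3, by omega⟩
  show PySem.Int.toChars ((m+3 : Nat) : Int) = _
  unfold PySem.Int.toChars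
  rw [if_neg (by omega)]
  have ht : ((m+3 : Nat) : Int).toNat = m + 3 := by omega
  rw [ht]
  show Nat.toDigitsCore 10 (m+3+1) (m+3) [] = _
  rw [show m+3+1 = (m+1)+3 by omega]
  rw [tdc_step, if_neg (by omega)]
  rw [tdc_step, if_neg (by omega)]
  rw [tdc_step, if_pos (by omega)]
  rw [Nat.div_div_eq_div_mul]
  norm_num
  rw [Nat.mod_eq_of_lt (by omega)]

theorem toChars_four (n : Nat) (h1 : 1000 ≤ n) (h2 : n ≤ 9999) :
    PySem.Int.toChars (n : Int) =
      [Nat.digitChar (n / 1000), Nat.digitChar (n / 100 % 10), Nat.digitChar (n / 10 % 10),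
        Nat.digitChar (n % 10)] := by
  obtain ⟨m, rfl⟩ : ∃ m, n = m + 4 := ⟨n - 4, by omega⟩
  show PySem.Int.toChars ((m+4 : Nat) : Int) = _
  unfold PySem.Int.toChars
  rw [if_neg (by omega)]
  have ht : ((m+4 : Nat) : Int).toNat = m + 4 := by omega
  rw [ht]
  show Nat.toDigitsCore 10 (m+4+1) (m+4) [] = _
  rw [show m+4+1 = (m+1)+4 by omega]
  rw [tdc_step, if_neg (by omega)]
  rw [tdc_step, if_neg (by omega)]
  rw [tdc_step, if_neg (by omega)]
  rw [tdc_step, if_pos (by omega)]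
  rw [Nat.div_div_eq_div_mul, Nat.div_div_eq_div_mul]
  norm_num
  rw [Nat.mod_eq_of_lt (by omega)]
  exact ⟨rfl, by rw [Nat.div_div_eq_div_mul]⟩

theorem ofStr_digitChar : ∀ k : Nat, k < 10 → (PySem.Int.ofStr? (String.ofList [Nat.digitChar k])).getD 0 = (k : Int) := by decide

theorem core3 : ∀ k1 : Nat, k1 < 10 → ∀ k2 : Nat, k2 < 10 → ∀ k3 : Nat, k3 < 10 →
    PySem.Int.bxor
      (PySem.Int.bxor
        (PySem.Int.bxor
          (PySem.Int.bxor
            (PySem.Int.bxor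
              (PySem.Int.bxor
                (PySem.Int.bxor
                  (PySem.Int.bxor
                    (PySem.Int.bxor (PySem.Int.bxor (PySem.Int.bxor (pyAnd 0 2048) (pyAnd 0 1024)) (pyAnd 0 512))
                      (pyAnd (PySem.Int.band (k1 : Int) 4) 256))
                    (pyAnd (PySem.Int.band (k1 : Int) 2) 128))
                  (pyAnd (PySem.Int.band (k1 : Int) 1) 64))
                (pyAnd (PySem.Int.band (k2 : Int) 4) 32))
              (pyAnd (PySem.Int.band (k2 : Int) 2) 16))
            (pyAnd (PySem.Int.band (k2 : Int) 1) 8))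
          (pyAnd (PySem.Int.band (k3 : Int) 4) 4))
        (pyAnd (PySem.Int.band (k3 : Int) 2) 2))
      (pyAnd (PySem.Int.band (k3 : Int) 1) 1) =
    ((0 * 8 + PySem.Int.band (k1 : Int) 7) * 8 + PySem.Int.band (k2 : Int) 7) * 8 +
      PySem.Int.band (k3 : Int) 7 := by decide

set_option maxHeartbeats 1000000 in
theorem core4_0 : ∀ k1 : Nat, k1 < 10 → ∀ k2 : Nat, k2 < 10 → ∀ k3 : Nat, k3 < 10 →
    PySem.Int.bxor
      (PySem.Int.bxor
        (PySem.Int.bxor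
          (PySem.Int.bxor
            (PySem.Int.bxor
              (PySem.Int.bxor
                (PySem.Int.bxor
                  (PySem.Int.bxor
                    (PySem.Int.bxor
                      (PySem.Int.bxor
                        (PySem.Int.bxor (pyAnd (PySem.Int.band (0 : Int) 4) 2048)
                          (pyAnd (PySem.Int.band (0 : Int) 2) 1024))
                        (pyAnd (PySem.Int.band (0 : Int) 1) 512))
                      (pyAnd (PySem.Int.band (k1 : Int) 4) 256))
                    (pyAnd (PySem.Int.band (k1 : Int) 2) 128))
                  (pyAnd (PySem.Int.band (k1 : Int) 1) 64))
                (pyAnd (PySem.Int.band (k2 : Int) 4) 32))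
              (pyAnd (PySem.Int.band (k2 : Int) 2) 16))
            (pyAnd (PySem.Int.band (k2 : Int) 1) 8))
          (pyAnd (PySem.Int.band (k3 : Int) 4) 4))
        (pyAnd (PySem.Int.band (k3 : Int) 2) 2))
      (pyAnd (PySem.Int.band (k3 : Int) 1) 1) =
    (((0 * 8 + PySem.Int.band (0 : Int) 7) * 8 + PySem.Int.band (k1 : Int) 7) * 8 +
        PySem.Int.band (k2 : Int) 7) * 8 +
      PySem.Int.band (k3 : Int) 7 := by decide

set_option maxHeartbeats 1000000 in
theorem core4_1 : ∀ k1 : Nat, k1 < 10 → ∀ k2 : Nat, k2 < 10 → ∀ k3 : Nat, k3 < 10 →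
    PySem.Int.bxor
      (PySem.Int.bxor
        (PySem.Int.bxor
          (PySem.Int.bxor
            (PySem.Int.bxor
              (PySem.Int.bxor
                (PySem.Int.bxor
                  (PySem.Int.bxor
                    (PySem.Int.bxor
                      (PySem.Int.bxor
                        (PySem.Int.bxor (pyAnd (PySem.Int.band (1 : Int) 4) 2048)
                          (pyAnd (PySem.Int.band (1 : Int) 2) 1024))
                        (pyAnd (PySem.Int.band (1 : Int) 1) 512))
                      (pyAnd (PySem.Int.band (k1 : Int) 4) 256))
                    (pyAnd (PySem.Int.band (k1 : Int) 2) 128))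
                  (pyAnd (PySem.Int.band (k1 : Int) 1) 64))
                (pyAnd (PySem.Int.band (k2 : Int) 4) 32))
              (pyAnd (PySem.Int.band (k2 : Int) 2) 16))
            (pyAnd (PySem.Int.band (k2 : Int) 1) 8))
          (pyAnd (PySem.Int.band (k3 : Int) 4) 4))
        (pyAnd (PySem.Int.band (k3 : Int) 2) 2))
      (pyAnd (PySem.Int.band (k3 : Int) 1) 1) =
    (((0 * 8 + PySem.Int.band (1 : Int) 7) * 8 + PySem.Int.band (k1 : Int) 7) * 8 +
        PySem.Int.band (k2 : Int) 7) * 8 +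
      PySem.Int.band (k3 : Int) 7 := by decide

set_option maxHeartbeats 1000000 in
theorem core4_2 : ∀ k1 : Nat, k1 < 10 → ∀ k2 : Nat, k2 < 10 → ∀ k3 : Nat, k3 < 10 →
    PySem.Int.bxor
      (PySem.Int.bxor
        (PySem.Int.bxor
          (PySem.Int.bxor
            (PySem.Int.bxor
              (PySem.Int.bxor
                (PySem.Int.bxor
                  (PySem.Int.bxor
                    (PySem.Int.bxor
                      (PySem.Int.bxor
                        (PySem.Int.bxor (pyAnd (PySem.Int.band (2 : Int) 4) 2048)
                          (pyAnd (PySem.Int.band (2 : Int) 2) 1024))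
                        (pyAnd (PySem.Int.band (2 : Int) 1) 512))
                      (pyAnd (PySem.Int.band (k1 : Int) 4) 256))
                    (pyAnd (PySem.Int.band (k1 : Int) 2) 128))
                  (pyAnd (PySem.Int.band (k1 : Int) 1) 64))
                (pyAnd (PySem.Int.band (k2 : Int) 4) 32))
              (pyAnd (PySem.Int.band (k2 : Int) 2) 16))
            (pyAnd (PySem.Int.band (k2 : Int) 1) 8))
          (pyAnd (PySem.Int.band (k3 : Int) 4) 4))
        (pyAnd (PySem.Int.band (k3 : Int) 2) 2))
      (pyAnd (PySem.Int.band (k3 : Int) 1) 1) =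
    (((0 * 8 + PySem.Int.band (2 : Int) 7) * 8 + PySem.Int.band (k1 : Int) 7) * 8 +
        PySem.Int.band (k2 : Int) 7) * 8 +
      PySem.Int.band (k3 : Int) 7 := by decide

set_option maxHeartbeats 1000000 in
theorem core4_3 : ∀ k1 : Nat, k1 < 10 → ∀ k2 : Nat, k2 < 10 → ∀ k3 : Nat, k3 < 10 →
    PySem.Int.bxor
      (PySem.Int.bxor
        (PySem.Int.bxor
          (PySem.Int.bxor
            (PySem.Int.bxor
              (PySem.Int.bxor
                (PySem.Int.bxor
                  (PySem.Int.bxor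
                    (PySem.Int.bxor
                      (PySem.Int.bxor
                        (PySem.Int.bxor (pyAnd (PySem.Int.band (3 : Int) 4) 2048)
                          (pyAnd (PySem.Int.band (3 : Int) 2) 1024))
                        (pyAnd (PySem.Int.band (3 : Int) 1) 512))
                      (pyAnd (PySem.Int.band (k1 : Int) 4) 256))
                    (pyAnd (PySem.Int.band (k1 : Int) 2) 128))
                  (pyAnd (PySem.Int.band (k1 : Int) 1) 64))
                (pyAnd (PySem.Int.band (k2 : Int) 4) 32))
              (pyAnd (PySem.Int.band (k2 : Int) 2) 16))
            (pyAnd (PySem.Int.band (k2 : Int) 1) 8))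
          (pyAnd (PySem.Int.band (k3 : Int) 4) 4))
        (pyAnd (PySem.Int.band (k3 : Int) 2) 2))
      (pyAnd (PySem.Int.band (k3 : Int) 1) 1) =
    (((0 * 8 + PySem.Int.band (3 : Int) 7) * 8 + PySem.Int.band (k1 : Int) 7) * 8 +
        PySem.Int.band (k2 : Int) 7) * 8 +
      PySem.Int.band (k3 : Int) 7 := by decide

set_option maxHeartbeats 1000000 in
theorem core4_4 : ∀ k1 : Nat, k1 < 10 → ∀ k2 : Nat, k2 < 10 → ∀ k3 : Nat, k3 < 10 →
    PySem.Int.bxor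
      (PySem.Int.bxor
        (PySem.Int.bxor
          (PySem.Int.bxor
            (PySem.Int.bxor
              (PySem.Int.bxor
                (PySem.Int.bxor
                  (PySem.Int.bxor
                    (PySem.Int.bxor
                      (PySem.Int.bxor
                        (PySem.Int.bxor (pyAnd (PySem.Int.band (4 : Int) 4) 2048)
                          (pyAnd (PySem.Int.band (4 : Int) 2) 1024))
                        (pyAnd (PySem.Int.band (4 : Int) 1) 512))
                      (pyAnd (PySem.Int.band (k1 : Int) 4) 256))
                    (pyAnd (PySem.Int.band (k1 : Int) 2) 128))
                  (pyAnd (PySem.Int.band (k1 : Int) 1) 64))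
                (pyAnd (PySem.Int.band (k2 : Int) 4) 32))
              (pyAnd (PySem.Int.band (k2 : Int) 2) 16))
            (pyAnd (PySem.Int.band (k2 : Int) 1) 8))
          (pyAnd (PySem.Int.band (k3 : Int) 4) 4))
        (pyAnd (PySem.Int.band (k3 : Int) 2) 2))
      (pyAnd (PySem.Int.band (k3 : Int) 1) 1) =
    (((0 * 8 + PySem.Int.band (4 : Int) 7) * 8 + PySem.Int.band (k1 : Int) 7) * 8 +
        PySem.Int.band (k2 : Int) 7) * 8 +
      PySem.Int.band (k3 : Int) 7 := by decide

set_option maxHeartbeats 1000000 in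
theorem core4_5 : ∀ k1 : Nat, k1 < 10 → ∀ k2 : Nat, k2 < 10 → ∀ k3 : Nat, k3 < 10 →
    PySem.Int.bxor
      (PySem.Int.bxor
        (PySem.Int.bxor
          (PySem.Int.bxor
            (PySem.Int.bxor
              (PySem.Int.bxor
                (PySem.Int.bxor
                  (PySem.Int.bxor
                    (PySem.Int.bxor
                      (PySem.Int.bxor
                        (PySem.Int.bxor (pyAnd (PySem.Int.band (5 : Int) 4) 2048)
                          (pyAnd (PySem.Int.band (5 : Int) 2) 1024))
                        (pyAnd (PySem.Int.band (5 : Int) 1) 512))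
                      (pyAnd (PySem.Int.band (k1 : Int) 4) 256))
                    (pyAnd (PySem.Int.band (k1 : Int) 2) 128))
                  (pyAnd (PySem.Int.band (k1 : Int) 1) 64))
                (pyAnd (PySem.Int.band (k2 : Int) 4) 32))
              (pyAnd (PySem.Int.band (k2 : Int) 2) 16))
            (pyAnd (PySem.Int.band (k2 : Int) 1) 8))
          (pyAnd (PySem.Int.band (k3 : Int) 4) 4))
        (pyAnd (PySem.Int.band (k3 : Int) 2) 2))
      (pyAnd (PySem.Int.band (k3 : Int) 1) 1) =
    (((0 * 8 + PySem.Int.band (5 : Int) 7) * 8 + PySem.Int.band (k1 : Int) 7) * 8 +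
        PySem.Int.band (k2 : Int) 7) * 8 +
      PySem.Int.band (k3 : Int) 7 := by decide

set_option maxHeartbeats 1000000 in
theorem core4_6 : ∀ k1 : Nat, k1 < 10 → ∀ k2 : Nat, k2 < 10 → ∀ k3 : Nat, k3 < 10 →
    PySem.Int.bxor
      (PySem.Int.bxor
        (PySem.Int.bxor
          (PySem.Int.bxor
            (PySem.Int.bxor
              (PySem.Int.bxor
                (PySem.Int.bxor
                  (PySem.Int.bxor
                    (PySem.Int.bxor
                      (PySem.Int.bxor
                        (PySem.Int.bxor (pyAnd (PySem.Int.band (6 : Int) 4) 2048)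
                          (pyAnd (PySem.Int.band (6 : Int) 2) 1024))
                        (pyAnd (PySem.Int.band (6 : Int) 1) 512))
                      (pyAnd (PySem.Int.band (k1 : Int) 4) 256))
                    (pyAnd (PySem.Int.band (k1 : Int) 2) 128))
                  (pyAnd (PySem.Int.band (k1 : Int) 1) 64))
                (pyAnd (PySem.Int.band (k2 : Int) 4) 32))
              (pyAnd (PySem.Int.band (k2 : Int) 2) 16))
            (pyAnd (PySem.Int.band (k2 : Int) 1) 8))
          (pyAnd (PySem.Int.band (k3 : Int) 4) 4))
        (pyAnd (PySem.Int.band (k3 : Int) 2) 2))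
      (pyAnd (PySem.Int.band (k3 : Int) 1) 1) =
    (((0 * 8 + PySem.Int.band (6 : Int) 7) * 8 + PySem.Int.band (k1 : Int) 7) * 8 +
        PySem.Int.band (k2 : Int) 7) * 8 +
      PySem.Int.band (k3 : Int) 7 := by decide

set_option maxHeartbeats 1000000 in
theorem core4_7 : ∀ k1 : Nat, k1 < 10 → ∀ k2 : Nat, k2 < 10 → ∀ k3 : Nat, k3 < 10 →
    PySem.Int.bxor
      (PySem.Int.bxor
        (PySem.Int.bxor
          (PySem.Int.bxor
            (PySem.Int.bxor
              (PySem.Int.bxor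
                (PySem.Int.bxor
                  (PySem.Int.bxor
                    (PySem.Int.bxor
                      (PySem.Int.bxor
                        (PySem.Int.bxor (pyAnd (PySem.Int.band (7 : Int) 4) 2048)
                          (pyAnd (PySem.Int.band (7 : Int) 2) 1024))
                        (pyAnd (PySem.Int.band (7 : Int) 1) 512))
                      (pyAnd (PySem.Int.band (k1 : Int) 4) 256))
                    (pyAnd (PySem.Int.band (k1 : Int) 2) 128))
                  (pyAnd (PySem.Int.band (k1 : Int) 1) 64))
                (pyAnd (PySem.Int.band (k2 : Int) 4) 32))
              (pyAnd (PySem.Int.band (k2 : Int) 2) 16))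
            (pyAnd (PySem.Int.band (k2 : Int) 1) 8))
          (pyAnd (PySem.Int.band (k3 : Int) 4) 4))
        (pyAnd (PySem.Int.band (k3 : Int) 2) 2))
      (pyAnd (PySem.Int.band (k3 : Int) 1) 1) =
    (((0 * 8 + PySem.Int.band (7 : Int) 7) * 8 + PySem.Int.band (k1 : Int) 7) * 8 +
        PySem.Int.band (k2 : Int) 7) * 8 +
      PySem.Int.band (k3 : Int) 7 := by decide

set_option maxHeartbeats 1000000 in
theorem core4_8 : ∀ k1 : Nat, k1 < 10 → ∀ k2 : Nat, k2 < 10 → ∀ k3 : Nat, k3 < 10 →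
    PySem.Int.bxor
      (PySem.Int.bxor
        (PySem.Int.bxor
          (PySem.Int.bxor
            (PySem.Int.bxor
              (PySem.Int.bxor
                (PySem.Int.bxor
                  (PySem.Int.bxor
                    (PySem.Int.bxor
                      (PySem.Int.bxor
                        (PySem.Int.bxor (pyAnd (PySem.Int.band (8 : Int) 4) 2048)
                          (pyAnd (PySem.Int.band (8 : Int) 2) 1024))
                        (pyAnd (PySem.Int.band (8 : Int) 1) 512))
                      (pyAnd (PySem.Int.band (k1 : Int) 4) 256))
                    (pyAnd (PySem.Int.band (k1 : Int) 2) 128))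
                  (pyAnd (PySem.Int.band (k1 : Int) 1) 64))
                (pyAnd (PySem.Int.band (k2 : Int) 4) 32))
              (pyAnd (PySem.Int.band (k2 : Int) 2) 16))
            (pyAnd (PySem.Int.band (k2 : Int) 1) 8))
          (pyAnd (PySem.Int.band (k3 : Int) 4) 4))
        (pyAnd (PySem.Int.band (k3 : Int) 2) 2))
      (pyAnd (PySem.Int.band (k3 : Int) 1) 1) =
    (((0 * 8 + PySem.Int.band (8 : Int) 7) * 8 + PySem.Int.band (k1 : Int) 7) * 8 +
        PySem.Int.band (k2 : Int) 7) * 8 +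
      PySem.Int.band (k3 : Int) 7 := by decide

set_option maxHeartbeats 1000000 in
theorem core4_9 : ∀ k1 : Nat, k1 < 10 → ∀ k2 : Nat, k2 < 10 → ∀ k3 : Nat, k3 < 10 →
    PySem.Int.bxor
      (PySem.Int.bxor
        (PySem.Int.bxor
          (PySem.Int.bxor
            (PySem.Int.bxor
              (PySem.Int.bxor
                (PySem.Int.bxor
                  (PySem.Int.bxor
                    (PySem.Int.bxor
                      (PySem.Int.bxor
                        (PySem.Int.bxor (pyAnd (PySem.Int.band (9 : Int) 4) 2048)
                          (pyAnd (PySem.Int.band (9 : Int) 2) 1024))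
                        (pyAnd (PySem.Int.band (9 : Int) 1) 512))
                      (pyAnd (PySem.Int.band (k1 : Int) 4) 256))
                    (pyAnd (PySem.Int.band (k1 : Int) 2) 128))
                  (pyAnd (PySem.Int.band (k1 : Int) 1) 64))
                (pyAnd (PySem.Int.band (k2 : Int) 4) 32))
              (pyAnd (PySem.Int.band (k2 : Int) 2) 16))
            (pyAnd (PySem.Int.band (k2 : Int) 1) 8))
          (pyAnd (PySem.Int.band (k3 : Int) 4) 4))
        (pyAnd (PySem.Int.band (k3 : Int) 2) 2))
      (pyAnd (PySem.Int.band (k3 : Int) 1) 1) =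
    (((0 * 8 + PySem.Int.band (9 : Int) 7) * 8 + PySem.Int.band (k1 : Int) 7) * 8 +
        PySem.Int.band (k2 : Int) 7) * 8 +
      PySem.Int.band (k3 : Int) 7 := by decide

theorem core4 : ∀ k0 : Nat, k0 < 10 → ∀ k1 : Nat, k1 < 10 → ∀ k2 : Nat, k2 < 10 → ∀ k3 : Nat, k3 < 10 →
    PySem.Int.bxor
      (PySem.Int.bxor
        (PySem.Int.bxor
          (PySem.Int.bxor
            (PySem.Int.bxor
              (PySem.Int.bxor
                (PySem.Int.bxor
                  (PySem.Int.bxor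
                    (PySem.Int.bxor
                      (PySem.Int.bxor
                        (PySem.Int.bxor (pyAnd (PySem.Int.band (k0 : Int) 4) 2048)
                          (pyAnd (PySem.Int.band (k0 : Int) 2) 1024))
                        (pyAnd (PySem.Int.band (k0 : Int) 1) 512))
                      (pyAnd (PySem.Int.band (k1 : Int) 4) 256))
                    (pyAnd (PySem.Int.band (k1 : Int) 2) 128))
                  (pyAnd (PySem.Int.band (k1 : Int) 1) 64))
                (pyAnd (PySem.Int.band (k2 : Int) 4) 32))
              (pyAnd (PySem.Int.band (k2 : Int) 2) 16))
            (pyAnd (PySem.Int.band (k2 : Int) 1) 8))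
          (pyAnd (PySem.Int.band (k3 : Int) 4) 4))
        (pyAnd (PySem.Int.band (k3 : Int) 2) 2))
      (pyAnd (PySem.Int.band (k3 : Int) 1) 1) =
    (((0 * 8 + PySem.Int.band (k0 : Int) 7) * 8 + PySem.Int.band (k1 : Int) 7) * 8 +
        PySem.Int.band (k2 : Int) 7) * 8 +
      PySem.Int.band (k3 : Int) 7 := by
  intro k0 h0
  interval_cases k0
  · exact core4_0
  · exact core4_1
  · exact core4_2
  · exact core4_3
  · exact core4_4
  · exact core4_5
  · exact core4_6
  · exact core4_7
  · exact core4_8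
  · exact core4_9

theorem main3 (n : Nat) (h1 : 100 ≤ n) (h2 : n ≤ 999) :
    mod_to_stat (n : Int) = mod_to_stat_alt (n : Int) := by
  unfold mod_to_stat mod_to_stat_alt
  rw [toChars_three n h1 h2]
  simp only [List.flatMap_cons, List.map_cons, List.map_nil, List.flatMap_nil, List.append_nil,
    List.length_cons, List.length_nil, List.foldl_cons, List.foldl_nil, List.cons_append,
    List.nil_append, if_true, digitInt,
    ofStr_digitChar (n / 100) (by omega), ofStr_digitChar (n / 10 % 10) (by omega),
    ofStr_digitChar (n % 10) (by omega)]
  exact core3 _ (by omega) _ (by omega) _ (by omega)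

theorem main4 (n : Nat) (h1 : 1000 ≤ n) (h2 : n ≤ 9999) :
    mod_to_stat (n : Int) = mod_to_stat_alt (n : Int) := by
  unfold mod_to_stat mod_to_stat_alt
  rw [toChars_four n h1 h2]
  simp only [List.flatMap_cons, List.map_cons, List.map_nil, List.flatMap_nil, List.append_nil,
    List.length_cons, List.length_nil, List.foldl_cons, List.foldl_nil, List.cons_append,
    List.nil_append, digitInt,
    ofStr_digitChar (n / 1000) (by omega), ofStr_digitChar (n / 100 % 10) (by omega),
    ofStr_digitChar (n / 10 % 10) (by omega), ofStr_digitChar (n % 10) (by omega)]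
  exact core4 _ (by omega) _ (by omega) _ (by omega) _ (by omega)

-- ===== VERDICT (by name: the statement is the Claim_ definition above) =====
theorem mod_to_stat_spec : Claim_equal_mod_to_stat := by
  intro mod _ hpre
  obtain ⟨hlo, hhi⟩ := hpre
  have hm : mod = (mod.toNat : Int) := by omega
  unfold Spec_mod_to_stat
  rw [hm]
  by_cases h : mod ≤ 999
  · exact main3 _ (by omega) (by omega)
  · exact main4 _ (by omega) (by omega)
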